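-- pv_equiv track=rewrite | github.com/hyeongroyoon/Nudge | DataBase/FD_Superkey.py | is_superkey
-- ===== SOURCE A (Python) =====
-- def is_superkey(K, S, F):
--     newXp = K
--     oldXp = K
--     while(1):
--         oldXp = newXp
--         for Y, Z in F:
--             if Y.issubset(newXp):
--                 newXp = newXp | Z
--         if newXp == oldXp:
--             break
--     return (newXp == S)
-- ===== SOURCE B (Python) =====
-- def is_superkey(K, S, F):
--     # Attribute-driven worklist closure: index each FD under every attribute of
--     # its LHS once, seed the closure with K, fire the FDs whose LHS is already
--     # covered, then propagate: each newly derived attribute re-checks only the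
--     # FDs indexed under it.  No repeated full passes over F, no set-equality
--     # change detection.
--     watch = {}
--     for Y, Z in F:
--         for a in Y:
--             watch.setdefault(a, []).append((Y, Z))
--     closure = set(K)
--     queue = []
--     for Y, Z in F:
--         if Y <= closure:
--             for z in Z:
--                 if z not in closure:
--                     closure.add(z)
--                     queue.append(z)
--     while queue:
--         a = queue.pop()
--         for Y, Z in watch.get(a, ()):
--             if Y <= closure:
--                 for z in Z:
--                     if z not in closure:
--                         closure.add(z)
--                         queue.append(z)
--     return closure == S
-- ===== Notes on version B (the rewrite author's own statement) =====
-- stated objective: faster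
-- what changed: B replaces A's repeated full passes over F with set-equality change detection by an attribute-to-FD index built once plus a worklist of newly derived attributes, so an FD is re-examined only when an attribute of its LHS is derived.
import Mathlib
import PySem

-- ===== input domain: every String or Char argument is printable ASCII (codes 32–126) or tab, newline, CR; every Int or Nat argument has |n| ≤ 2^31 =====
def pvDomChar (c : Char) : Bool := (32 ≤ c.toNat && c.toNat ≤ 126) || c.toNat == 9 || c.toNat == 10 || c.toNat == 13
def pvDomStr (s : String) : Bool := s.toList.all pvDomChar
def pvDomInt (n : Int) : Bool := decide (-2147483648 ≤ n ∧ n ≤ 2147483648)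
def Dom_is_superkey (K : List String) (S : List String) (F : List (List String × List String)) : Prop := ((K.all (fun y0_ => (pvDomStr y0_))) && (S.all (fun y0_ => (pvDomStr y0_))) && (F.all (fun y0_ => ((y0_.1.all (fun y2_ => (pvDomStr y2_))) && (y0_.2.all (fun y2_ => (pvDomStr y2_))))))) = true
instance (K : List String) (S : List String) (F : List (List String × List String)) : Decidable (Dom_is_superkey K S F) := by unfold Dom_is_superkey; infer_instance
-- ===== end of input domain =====

-- B builds an attribute→FD index once and propagates with a worklist of newly derived
-- attributes, instead of A's repeated full passes over F until a fixpoint; return values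
-- are proved equal (neither side observably mutates its arguments).

-- ===== PORT A =====
-- one 'for Y, Z in F' pass of A's while-body
def passA (F : List (List String × List String)) (X : PySem.Set String) : PySem.Set String :=
  F.foldl (fun X p => if PySem.Set.issubset p.1 X then PySem.Set.union X p.2 else X) X

-- A's 'while(1)' loop; the fuel K.length + Σ|Z| + 1 is an upper bound on the rounds the
-- Python loop can run (each round before the break strictly enlarges newXp with elements
-- drawn from the Z's), so the fuel-0 fallback is never reached on any input.
def loopA (F : List (List String × List String)) : Nat → PySem.Set String → PySem.Set String
  | 0, X => X
  | f+1, X =>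
    let X' := passA F X
    if PySem.Set.equal X' X then X' else loopA F f X'

def is_superkey (K : List String) (S : List String) (F : List (List String × List String)) : Bool :=
  PySem.Set.equal (loopA F (K.length + (F.map (fun p => p.2.length)).sum + 1) K) S

-- ===== PORT B =====
-- 'for z in Z: if z not in closure: closure.add(z); queue.append(z)' on the state (closure, queue)
def addZ (st : PySem.Set String × List String) (Z : List String) : PySem.Set String × List String :=
  Z.foldl (fun st z =>
    if PySem.Set.contains st.1 z then st else (PySem.Set.add st.1 z, st.2 ++ [z])) st

-- 'for Y, Z in fds: if Y <= closure: <the inner Z-loop>'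
def checkFDs (fds : List (List String × List String)) (st : PySem.Set String × List String) :
    PySem.Set String × List String :=
  fds.foldl (fun st p => if PySem.Set.issubset p.1 st.1 then addZ st p.2 else st) st

-- 'for a in Y: watch.setdefault(a, []).append((Y, Z))'
def watchInner (p : List String × List String)
    (w : PySem.Dict String (List (List String × List String))) :
    PySem.Dict String (List (List String × List String)) :=
  p.1.foldl (fun w a => PySem.Dict.insert w a (PySem.Dict.getD w a [] ++ [p])) w

def buildWatch (F : List (List String × List String)) :
    PySem.Dict String (List (List String × List String)) :=
  F.foldl (fun w p => watchInner p w) PySem.Dict.empty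

-- 'while queue:' loop (queue.pop() takes the last element); every attribute is enqueued at
-- most once and only attributes from the Z's are ever enqueued, so fuel Σ|Z| + 1 always
-- outlasts the Python loop and the fuel-0 fallback is never reached.
def loopW (w : PySem.Dict String (List (List String × List String))) :
    Nat → PySem.Set String × List String → PySem.Set String
  | 0, st => st.1
  | f+1, st =>
    match st.2.getLast? with
    | none => st.1
    | some a => loopW w f (checkFDs (PySem.Dict.getD w a []) (st.1, st.2.dropLast))

def is_superkey_alt (K : List String) (S : List String) (F : List (List String × List String)) : Bool :=
  PySem.Set.equal
    (loopW (buildWatch F) ((F.map (fun p => p.2.length)).sum + 1)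
      (checkFDs F (PySem.Set.ofList K, []))) S

-- ===== PRECONDITION & SPEC =====
def Spec_is_superkey (K : List String) (S : List String) (F : List (List String × List String)) (out : Bool) : Prop := out = is_superkey_alt K S F
instance (K : List String) (S : List String) (F : List (List String × List String)) (out : Bool) : Decidable (Spec_is_superkey K S F out) := by unfold Spec_is_superkey; infer_instance

-- ===== CLAIM (what is proved, stated in full; the proofs are below) =====
def Claim_equal_is_superkey : Prop := ∀ (K : List String) (S : List String) (F : List (List String × List String)), Dom_is_superkey K S F → Spec_is_superkey K S F (is_superkey K S F)

-- ===== LEMMAS AND PROOFS =====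

-- x is derivable from K under the functional dependencies F
inductive Deriv (K : List String) (F : List (List String × List String)) : String → Prop
  | base {x : String} : x ∈ K → Deriv K F x
  | step {Y Z : List String} {x : String} :
      (Y, Z) ∈ F → (∀ y ∈ Y, Deriv K F y) → x ∈ Z → Deriv K F x

-- any K-containing, F-closed, sound set is exactly the set of derivable attributes
theorem mem_iff_deriv (K : List String) (F : List (List String × List String)) (C : List String)
    (hK : ∀ x ∈ K, x ∈ C) (hs : ∀ x ∈ C, Deriv K F x)
    (hc : ∀ p ∈ F, (∀ y ∈ p.1, y ∈ C) → ∀ z ∈ p.2, z ∈ C) :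
    ∀ x, x ∈ C ↔ Deriv K F x := by
  intro x
  constructor
  · exact hs x
  · intro h
    induction h with
    | base h => exact hK _ h
    | step hYZ _ hz ih => exact hc _ hYZ ih _ hz

-- set equality against S only depends on membership
theorem equal_congr {C C' S : List String} (h : ∀ x, x ∈ C ↔ x ∈ C') :
    PySem.Set.equal C S = PySem.Set.equal C' S := by
  have hiff : (PySem.Set.equal C S = true) ↔ (PySem.Set.equal C' S = true) := by
    rw [PySem.Set.equal_iff, PySem.Set.equal_iff]
    constructor
    · intro hc x; exact (h x).symm.trans (hc x)
    · intro hc x; exact (h x).trans (hc x)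
  cases ha : PySem.Set.equal C S <;> cases hb : PySem.Set.equal C' S <;> simp_all

theorem issubset_mono {s X X' : List String} (h : PySem.Set.issubset s X = true)
    (hm : ∀ x, x ∈ X → x ∈ X') : PySem.Set.issubset s X' = true :=
  (PySem.Set.issubset_iff _ _).2 fun x hx => hm x ((PySem.Set.issubset_iff _ _).1 h x hx)

theorem list_concat_cases {α : Type} (l : List α) : l = [] ∨ ∃ l' a, l = l' ++ [a] := by
  induction l with
  | nil => exact Or.inl rfl
  | cons x xs ih =>
    rcases ih with rfl | ⟨l', a, rfl⟩
    · exact Or.inr ⟨[], x, rfl⟩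
    · exact Or.inr ⟨x :: l', a, rfl⟩

-- ---------- A-side ----------

theorem union_append (X Z : List String) :
    ∃ e, PySem.Set.union X Z = X ++ e ∧ e.Nodup ∧ (∀ x ∈ e, x ∉ X) ∧ (∀ x ∈ e, x ∈ Z) := by
  refine ⟨(PySem.Set.ofList Z).filter (fun y => !(PySem.Set.contains X y)),
    PySem.Set.update_eq_append_filter X Z, (PySem.Set.nodup_ofList Z).filter _, ?_, ?_⟩
  · intro x hx hmem
    have hfalse := (List.mem_filter.1 hx).2
    simp only [Bool.not_eq_true'] at hfalse
    have hc : PySem.Set.contains X x = true := (PySem.Set.contains_iff _ _).2 hmem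
    rw [hfalse] at hc
    exact Bool.false_ne_true hc
  · intro x hx
    exact (PySem.Set.mem_ofList _ _).1 (List.mem_filter.1 hx).1

theorem passA_append (F : List (List String × List String)) :
    ∀ X : List String, ∃ e, passA F X = X ++ e ∧ e.Nodup ∧ (∀ x ∈ e, x ∉ X) ∧
      (∀ x ∈ e, x ∈ F.flatMap Prod.snd) := by
  induction F with
  | nil => intro X; exact ⟨[], by simp [passA], by simp, by simp, by simp⟩
  | cons p F ih =>
    intro X
    have hstep : passA (p :: F) X =
        passA F (if PySem.Set.issubset p.1 X = true then PySem.Set.union X p.2 else X) := rfl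
    rw [hstep]
    by_cases hsub : PySem.Set.issubset p.1 X = true
    · rw [if_pos hsub]
      obtain ⟨e1, he1, hn1, hd1, hm1⟩ := union_append X p.2
      obtain ⟨e2, he2, hn2, hd2, hm2⟩ := ih (PySem.Set.union X p.2)
      refine ⟨e1 ++ e2, by rw [he2, he1, List.append_assoc], ?_, ?_, ?_⟩
      · refine hn1.append hn2 ?_
        intro a ha1 ha2
        exact hd2 a ha2 (by rw [he1]; exact List.mem_append_right _ ha1)
      · intro x hx hmem
        rcases List.mem_append.1 hx with h | h
        · exact hd1 x h hmem
        · exact hd2 x h (by rw [he1]; exact List.mem_append_left _ hmem)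
      · intro x hx
        rcases List.mem_append.1 hx with h | h
        · exact List.mem_flatMap.2 ⟨p, by simp, hm1 x h⟩
        · rcases List.mem_flatMap.1 (hm2 x h) with ⟨q, hq, hxq⟩
          exact List.mem_flatMap.2 ⟨q, by simp [hq], hxq⟩
    · rw [if_neg hsub]
      obtain ⟨e, he, hn, hd, hm⟩ := ih X
      refine ⟨e, he, hn, hd, ?_⟩
      intro x hx
      rcases List.mem_flatMap.1 (hm x hx) with ⟨q, hq, hxq⟩
      exact List.mem_flatMap.2 ⟨q, by simp [hq], hxq⟩

theorem passA_sub {F : List (List String × List String)} {X : List String} :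
    ∀ x, x ∈ X → x ∈ passA F X := by
  obtain ⟨e, he, -, -, -⟩ := passA_append F X
  intro x hx
  rw [he]
  exact List.mem_append_left _ hx

theorem equal_append_iff {X e : List String} (hd : ∀ x ∈ e, x ∉ X) :
    PySem.Set.equal (X ++ e) X = true ↔ e = [] := by
  constructor
  · intro h
    cases e with
    | nil => rfl
    | cons a e =>
      have := ((PySem.Set.equal_iff _ _).1 h a).1 (by simp)
      exact absurd this (hd a (by simp))
  · intro h; subst h; simp [PySem.Set.equal_iff]

theorem passA_sound (K : List String) (F : List (List String × List String)) :
    ∀ (fds : List (List String × List String)), (∀ p ∈ fds, p ∈ F) →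
    ∀ X : List String, (∀ x ∈ X, Deriv K F x) → ∀ x ∈ passA fds X, Deriv K F x := by
  intro fds
  induction fds with
  | nil => intro _ X hX x hx; exact hX x hx
  | cons p fds ih =>
    intro hf X hX
    have hstep : passA (p :: fds) X =
        passA fds (if PySem.Set.issubset p.1 X = true then PySem.Set.union X p.2 else X) := rfl
    rw [hstep]
    have hf' : ∀ q ∈ fds, q ∈ F := fun q hq => hf q (List.mem_cons_of_mem _ hq)
    by_cases hsub : PySem.Set.issubset p.1 X = true
    · rw [if_pos hsub]
      refine ih hf' _ ?_
      intro x hx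
      rcases (PySem.Set.mem_union _ _ _).1 hx with h | h
      · exact hX x h
      · exact Deriv.step (Y := p.1) (Z := p.2) (hf p (by simp))
          (fun y hy => hX y ((PySem.Set.issubset_iff _ _).1 hsub y hy)) h
    · rw [if_neg hsub]
      exact ih hf' X hX

theorem fire_in_pass (Y Z : List String) :
    ∀ (fds : List (List String × List String)) (X : List String), (Y, Z) ∈ fds →
      PySem.Set.issubset Y X = true → ∀ z ∈ Z, z ∈ passA fds X := by
  intro fds
  induction fds with
  | nil => intro X h; exact absurd h (by simp)
  | cons p fds ih =>
    intro X hmem hsub z hz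
    have hstep : passA (p :: fds) X =
        passA fds (if PySem.Set.issubset p.1 X = true then PySem.Set.union X p.2 else X) := rfl
    rw [hstep]
    rcases List.mem_cons.1 hmem with heq | htl
    · obtain ⟨Y', Z'⟩ := p
      injection heq with h1 h2
      subst h1; subst h2
      rw [if_pos hsub]
      exact passA_sub z ((PySem.Set.mem_union _ _ _).2 (Or.inr hz))
    · have hXsub : ∀ x, x ∈ X →
          x ∈ (if PySem.Set.issubset p.1 X = true then PySem.Set.union X p.2 else X) := by
        intro x hx
        split
        · exact (PySem.Set.mem_union _ _ _).2 (Or.inl hx)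
        · exact hx
      exact ih _ htl (issubset_mono hsub hXsub) z hz

-- measure for both loops: distinct RHS attributes not yet in the closure
def missing (F : List (List String × List String)) (C : List String) : Nat :=
  ((F.flatMap Prod.snd).toFinset \ C.toFinset).card

theorem missing_le (F : List (List String × List String)) (C : List String) :
    missing F C ≤ (F.map (fun p => p.2.length)).sum := by
  have h1 : ((F.flatMap Prod.snd).toFinset \ C.toFinset).card ≤ (F.flatMap Prod.snd).toFinset.card :=
    Finset.card_le_card Finset.sdiff_subset
  have h2 : (F.flatMap Prod.snd).toFinset.card ≤ (F.flatMap Prod.snd).length :=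
    List.toFinset_card_le _
  have h3 : (F.flatMap Prod.snd).length = (F.map (fun p => p.2.length)).sum := by
    induction F with
    | nil => simp
    | cons p F _ => simp
  unfold missing
  omega

theorem missing_append (F : List (List String × List String)) (C e : List String)
    (hn : e.Nodup) (hd : ∀ x ∈ e, x ∉ C) (hm : ∀ x ∈ e, x ∈ F.flatMap Prod.snd) :
    missing F (C ++ e) + e.length = missing F C := by
  unfold missing
  have hsub : e.toFinset ⊆ (F.flatMap Prod.snd).toFinset \ C.toFinset := by
    intro a ha
    rw [List.mem_toFinset] at ha
    rw [Finset.mem_sdiff, List.mem_toFinset, List.mem_toFinset]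
    exact ⟨hm a ha, hd a ha⟩
  have heq : (F.flatMap Prod.snd).toFinset \ (C ++ e).toFinset
      = ((F.flatMap Prod.snd).toFinset \ C.toFinset) \ e.toFinset := by
    ext a
    simp only [Finset.mem_sdiff, List.mem_toFinset, List.mem_append]
    tauto
  have hle := Finset.card_le_card hsub
  rw [List.toFinset_card_of_nodup hn] at hle
  rw [heq, Finset.card_sdiff, Finset.inter_eq_left.2 hsub, List.toFinset_card_of_nodup hn]
  omega

theorem loopA_main (K : List String) (F : List (List String × List String)) :
    ∀ (f : Nat) (X : List String), missing F X < f → (∀ x ∈ X, Deriv K F x) →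
      passA F (loopA F f X) = loopA F f X ∧ (∀ x ∈ X, x ∈ loopA F f X) ∧
      (∀ x ∈ loopA F f X, Deriv K F x) := by
  intro f
  induction f with
  | zero => intro X h _; exact absurd h (by omega)
  | succ f ih =>
    intro X hf hX
    have hunf : loopA F (f+1) X =
        if PySem.Set.equal (passA F X) X = true then passA F X else loopA F f (passA F X) := rfl
    rw [hunf]
    obtain ⟨e, he, hn, hd, hm⟩ := passA_append F X
    by_cases heq : PySem.Set.equal (passA F X) X = true
    · rw [if_pos heq]
      have hnil : e = [] := (equal_append_iff hd).1 (by rw [← he]; exact heq)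
      have hfix : passA F X = X := by rw [he, hnil, List.append_nil]
      refine ⟨?_, ?_, ?_⟩
      · rw [hfix]; exact hfix
      · exact passA_sub
      · exact passA_sound K F F (fun p hp => hp) X hX
    · rw [if_neg heq]
      have hne : e ≠ [] := by
        intro hnil
        exact heq (by rw [he, hnil, List.append_nil]
                      exact (PySem.Set.equal_iff _ _).2 fun x => Iff.rfl)
      have hmiss : missing F (passA F X) < f := by
        have hma := missing_append F X e hn hd hm
        rw [← he] at hma
        have hlen : 1 ≤ e.length := by
          cases e with
          | nil => exact absurd rfl hne
          | cons a e => simp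
        omega
      have hX' : ∀ x ∈ passA F X, Deriv K F x :=
        passA_sound K F F (fun p hp => hp) X hX
      obtain ⟨c1, c2, c3⟩ := ih (passA F X) hmiss hX'
      exact ⟨c1, fun x hx => c2 x (passA_sub x hx), c3⟩

theorem loopA_charac (K : List String) (F : List (List String × List String)) :
    ∀ x, x ∈ loopA F (K.length + (F.map (fun p => p.2.length)).sum + 1) K ↔ Deriv K F x := by
  have hfuel : missing F K < K.length + (F.map (fun p => p.2.length)).sum + 1 := by
    have := missing_le F K
    omega
  obtain ⟨hfix, hKsub, hsound⟩ :=
    loopA_main K F _ K hfuel (fun x hx => Deriv.base hx)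
  refine mem_iff_deriv K F _ hKsub hsound ?_
  intro p hp hY z hz
  have hsub : PySem.Set.issubset p.1
      (loopA F (K.length + (F.map (fun p => p.2.length)).sum + 1) K) = true :=
    (PySem.Set.issubset_iff _ _).2 hY
  have := fire_in_pass p.1 p.2 F _ hp hsub z hz
  rwa [hfix] at this

-- ---------- B-side ----------

theorem addZ_spec (Z : List String) :
    ∀ (C q : List String), ∃ new,
      addZ (C, q) Z = (C ++ new, q ++ new) ∧ new.Nodup ∧
      (∀ z ∈ new, z ∉ C ∧ z ∈ Z) ∧ (∀ z ∈ Z, z ∈ C ++ new) := by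
  induction Z with
  | nil => intro C q; exact ⟨[], by simp [addZ], by simp, by simp, by simp⟩
  | cons z Z ih =>
    intro C q
    have hstep : addZ (C, q) (z :: Z) =
        addZ (if PySem.Set.contains C z = true then (C, q)
              else (PySem.Set.add C z, q ++ [z])) Z := rfl
    by_cases hz : z ∈ C
    · have hc : PySem.Set.contains C z = true := (PySem.Set.contains_iff _ _).2 hz
      rw [hstep, if_pos hc]
      obtain ⟨new, h1, h2, h3, h4⟩ := ih C q
      refine ⟨new, h1, h2, fun a ha => ⟨(h3 a ha).1, List.mem_cons_of_mem _ (h3 a ha).2⟩, ?_⟩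
      intro a ha
      rcases List.mem_cons.1 ha with rfl | ha'
      · exact List.mem_append_left _ hz
      · exact h4 a ha'
    · have hc : ¬ PySem.Set.contains C z = true :=
        fun h => hz ((PySem.Set.contains_iff _ _).1 h)
      rw [hstep, if_neg hc, PySem.Set.add_of_not_mem hz]
      obtain ⟨new, h1, h2, h3, h4⟩ := ih (C ++ [z]) (q ++ [z])
      refine ⟨z :: new, ?_, ?_, ?_, ?_⟩
      · rw [h1]; simp
      · refine List.nodup_cons.2 ⟨?_, h2⟩
        intro hzn
        exact (h3 z hzn).1 (List.mem_append_right _ (by simp))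
      · intro a ha
        rcases List.mem_cons.1 ha with rfl | ha'
        · exact ⟨hz, by simp⟩
        · exact ⟨fun hmem => (h3 a ha').1 (List.mem_append_left _ hmem),
            List.mem_cons_of_mem _ (h3 a ha').2⟩
      · intro a ha
        rcases List.mem_cons.1 ha with rfl | ha'
        · simp
        · have := h4 a ha'
          simpa using this

theorem checkFDs_spec (K : List String) (F : List (List String × List String)) :
    ∀ (fds : List (List String × List String)), (∀ p ∈ fds, p ∈ F) →
    ∀ (C q : List String), ∃ new,
      checkFDs fds (C, q) = (C ++ new, q ++ new) ∧ new.Nodup ∧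
      (∀ z ∈ new, z ∉ C ∧ z ∈ F.flatMap Prod.snd) ∧
      (∀ p ∈ fds, (∀ y ∈ p.1, y ∈ C) → ∀ z ∈ p.2, z ∈ C ++ new) ∧
      ((∀ x ∈ C, Deriv K F x) → ∀ x ∈ new, Deriv K F x) := by
  intro fds
  induction fds with
  | nil =>
    intro _ C q
    exact ⟨[], by simp [checkFDs], by simp, by simp, by simp, by simp⟩
  | cons p fds ih =>
    intro hf C q
    have hf' : ∀ r ∈ fds, r ∈ F := fun r hr => hf r (List.mem_cons_of_mem _ hr)
    have hpF : p ∈ F := hf p (by simp)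
    have hstep : checkFDs (p :: fds) (C, q) =
        checkFDs fds (if PySem.Set.issubset p.1 C = true then addZ (C, q) p.2 else (C, q)) := rfl
    by_cases hsub : PySem.Set.issubset p.1 C = true
    · rw [hstep, if_pos hsub]
      obtain ⟨n1, a1, a2, a3, a4⟩ := addZ_spec p.2 C q
      rw [a1]
      obtain ⟨n2, b1, b2, b3, b4, b5⟩ := ih hf' (C ++ n1) (q ++ n1)
      rw [b1]
      refine ⟨n1 ++ n2, by simp, ?_, ?_, ?_, ?_⟩
      · refine a2.append b2 ?_
        intro a ha1 ha2
        exact (b3 a ha2).1 (List.mem_append_right _ ha1)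
      · intro a ha
        rcases List.mem_append.1 ha with h | h
        · exact ⟨(a3 a h).1, List.mem_flatMap.2 ⟨p, hpF, (a3 a h).2⟩⟩
        · exact ⟨fun hmem => (b3 a h).1 (List.mem_append_left _ hmem), (b3 a h).2⟩
      · intro r hr hY z hz
        rcases List.mem_cons.1 hr with rfl | hr'
        · have := a4 z hz
          rcases List.mem_append.1 this with h | h
          · exact List.mem_append_left _ h
          · exact List.mem_append_right _ (List.mem_append_left _ h)
        · have := b4 r hr' (fun y hy => List.mem_append_left _ (hY y hy)) z hz
          simpa using this
      · intro hsound a ha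
        have hsound1 : ∀ x ∈ C ++ n1, Deriv K F x := by
          intro x hx
          rcases List.mem_append.1 hx with h | h
          · exact hsound x h
          · exact Deriv.step (Y := p.1) (Z := p.2) hpF
              (fun y hy => hsound y ((PySem.Set.issubset_iff _ _).1 hsub y hy)) ((a3 x h).2)
        rcases List.mem_append.1 ha with h | h
        · exact hsound1 a (List.mem_append_right _ h)
        · exact b5 hsound1 a h
    · rw [hstep, if_neg hsub]
      obtain ⟨new, b1, b2, b3, b4, b5⟩ := ih hf' C q
      refine ⟨new, b1, b2, b3, ?_, b5⟩
      intro r hr hY z hz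
      rcases List.mem_cons.1 hr with rfl | hr'
      · exact absurd ((PySem.Set.issubset_iff _ _).2 hY) hsub
      · exact b4 r hr' hY z hz

-- watch lists only contain FDs of F …
theorem watchInner_sound (G : List (List String × List String)) (p : List String × List String)
    (hp : p ∈ G) :
    ∀ (l : List String) (w : PySem.Dict String (List (List String × List String))),
      (∀ a q, q ∈ PySem.Dict.getD w a [] → q ∈ G) →
      ∀ a q, q ∈ PySem.Dict.getD
        (l.foldl (fun w a => PySem.Dict.insert w a (PySem.Dict.getD w a [] ++ [p])) w) a [] →
      q ∈ G := by
  intro l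
  induction l with
  | nil => intro w hw; exact hw
  | cons b l ih =>
    intro w hw
    refine ih _ ?_
    intro a q hq
    rw [PySem.Dict.getD_insert] at hq
    by_cases hab : a = b
    · rw [if_pos hab] at hq
      rcases List.mem_append.1 hq with h | h
      · exact hw b q (hab ▸ h)
      · rw [List.mem_singleton.1 h]; exact hp
    · rw [if_neg hab] at hq
      exact hw a q hq

theorem buildWatch_sound (F : List (List String × List String)) :
    ∀ a q, q ∈ PySem.Dict.getD (buildWatch F) a [] → q ∈ F := by
  suffices h : ∀ (G fds : List (List String × List String)), (∀ p ∈ fds, p ∈ G) →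
      ∀ (w : PySem.Dict String (List (List String × List String))),
      (∀ a q, q ∈ PySem.Dict.getD w a [] → q ∈ G) →
      ∀ a q, q ∈ PySem.Dict.getD (fds.foldl (fun w p => watchInner p w) w) a [] → q ∈ G by
    refine h F F (fun p hp => hp) PySem.Dict.empty ?_
    intro a q hq
    rw [PySem.Dict.getD_empty] at hq
    exact absurd hq (by simp)
  intro G fds
  induction fds with
  | nil => intro _ w hw; exact hw
  | cons p fds ih =>
    intro hf w hw
    exact ih (fun q hq => hf q (List.mem_cons_of_mem _ hq)) _
      (watchInner_sound G p (hf p (by simp)) p.1 w hw)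

-- … and watch lists are only ever appended to
theorem watchInner_mono (p : List String × List String) :
    ∀ (l : List String) (w : PySem.Dict String (List (List String × List String))) (a : String)
      (q : List String × List String), q ∈ PySem.Dict.getD w a [] →
      q ∈ PySem.Dict.getD
        (l.foldl (fun w b => PySem.Dict.insert w b (PySem.Dict.getD w b [] ++ [p])) w) a [] := by
  intro l
  induction l with
  | nil => intro w a q hq; exact hq
  | cons b l ih =>
    intro w a q hq
    refine ih _ a q ?_
    rw [PySem.Dict.getD_insert]
    by_cases hab : a = b
    · rw [if_pos hab]
      exact List.mem_append_left _ (hab ▸ hq)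
    · rw [if_neg hab]; exact hq

theorem watchInner_self (p : List String × List String) (a : String) :
    ∀ (l : List String) (w : PySem.Dict String (List (List String × List String))), a ∈ l →
      p ∈ PySem.Dict.getD
        (l.foldl (fun w b => PySem.Dict.insert w b (PySem.Dict.getD w b [] ++ [p])) w) a [] := by
  intro l
  induction l with
  | nil => intro w h; exact absurd h (by simp)
  | cons b l ih =>
    intro w hal
    by_cases hab : a = b
    · refine watchInner_mono p l _ a p ?_
      rw [PySem.Dict.getD_insert, if_pos hab]
      exact List.mem_append_right _ (by simp)
    · rcases List.mem_cons.1 hal with h | h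
      · exact absurd h hab
      · exact ih _ h

theorem watch_fold_mono :
    ∀ (fds : List (List String × List String))
      (w : PySem.Dict String (List (List String × List String))) (a : String)
      (p : List String × List String), p ∈ PySem.Dict.getD w a [] →
      p ∈ PySem.Dict.getD (fds.foldl (fun w p => watchInner p w) w) a [] := by
  intro fds
  induction fds with
  | nil => intro w a p h; exact h
  | cons r fds ih =>
    intro w a p h
    exact ih _ a p (watchInner_mono r r.1 _ a p h)

theorem buildWatch_complete (F : List (List String × List String)) :
    ∀ p ∈ F, ∀ a ∈ p.1, p ∈ PySem.Dict.getD (buildWatch F) a [] := by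
  suffices h : ∀ (fds : List (List String × List String))
      (w : PySem.Dict String (List (List String × List String))),
      ∀ p ∈ fds, ∀ a ∈ p.1, p ∈ PySem.Dict.getD (fds.foldl (fun w p => watchInner p w) w) a [] by
    exact h F PySem.Dict.empty
  intro fds
  induction fds with
  | nil => intro w p hp; exact absurd hp (by simp)
  | cons r fds ih =>
    intro w p hp a ha
    rcases List.mem_cons.1 hp with rfl | hp'
    · exact watch_fold_mono fds _ a p (watchInner_self p a p.1 w ha)
    · exact ih _ p hp' a ha

-- the worklist-loop invariant is carried as three explicit hypotheses
theorem loopW_main (K : List String) (F : List (List String × List String)) :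
    ∀ (f : Nat) (st : PySem.Set String × List String),
      st.2.length + missing F st.1 < f →
      (∀ x ∈ K, x ∈ st.1) → (∀ x ∈ st.1, Deriv K F x) →
      (∀ p ∈ F, (∀ y ∈ p.1, y ∈ st.1 ∧ y ∉ st.2) → ∀ z ∈ p.2, z ∈ st.1) →
      (∀ x ∈ K, x ∈ loopW (buildWatch F) f st) ∧
      (∀ x ∈ loopW (buildWatch F) f st, Deriv K F x) ∧
      (∀ p ∈ F, (∀ y ∈ p.1, y ∈ loopW (buildWatch F) f st) →
        ∀ z ∈ p.2, z ∈ loopW (buildWatch F) f st) := by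
  intro f
  induction f with
  | zero => intro st h _ _ _; exact absurd h (by omega)
  | succ f ih =>
    intro st hfuel i1 i2 i3
    obtain ⟨C, q⟩ := st
    rcases list_concat_cases q with rfl | ⟨q', a, rfl⟩
    · have hunf : loopW (buildWatch F) (f+1) (C, ([] : List String)) = C := rfl
      rw [hunf]
      refine ⟨i1, i2, ?_⟩
      intro p hp hY z hz
      exact i3 p hp (fun y hy => ⟨hY y hy, by simp⟩) z hz
    · have hunf : loopW (buildWatch F) (f+1) (C, q' ++ [a]) =
          loopW (buildWatch F) f
            (checkFDs (PySem.Dict.getD (buildWatch F) a []) (C, q')) := by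
        have h1 : (q' ++ [a]).getLast? = some a := by simp
        have h2 : (q' ++ [a]).dropLast = q' := by simp
        show (match (q' ++ [a]).getLast? with
          | none => C
          | some b => loopW (buildWatch F) f
              (checkFDs (PySem.Dict.getD (buildWatch F) b []) (C, (q' ++ [a]).dropLast))) = _
        rw [h1, h2]
      rw [hunf]
      obtain ⟨new, b1, b2, b3, b4, b5⟩ :=
        checkFDs_spec K F (PySem.Dict.getD (buildWatch F) a []) (buildWatch_sound F a) C q'
      rw [b1]
      have hfl : (q' ++ [a]).length + missing F C < f + 1 := hfuel
      have hmiss := missing_append F C new b2 (fun x hx => (b3 x hx).1) (fun x hx => (b3 x hx).2)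
      have hfuel' : (q' ++ new).length + missing F (C ++ new) < f := by
        rw [List.length_append] at hfl ⊢
        simp only [List.length_cons, List.length_nil] at hfl
        omega
      have j1 : ∀ x ∈ K, x ∈ C ++ new := fun x hx => List.mem_append_left _ (i1 x hx)
      have j2 : ∀ x ∈ C ++ new, Deriv K F x := by
        intro x hx
        rcases List.mem_append.1 hx with h | h
        · exact i2 x h
        · exact b5 i2 x h
      have j3 : ∀ p ∈ F, (∀ y ∈ p.1, y ∈ C ++ new ∧ y ∉ q' ++ new) → ∀ z ∈ p.2, z ∈ C ++ new := by
        intro p hp hY z hz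
        have hYsplit : ∀ y ∈ p.1, y ∈ C ∧ y ∉ q' := by
          intro y hy
          obtain ⟨hy1, hy2⟩ := hY y hy
          rcases List.mem_append.1 hy1 with h | h
          · exact ⟨h, fun hc => hy2 (List.mem_append_left _ hc)⟩
          · exact absurd (List.mem_append_right _ h) hy2
        by_cases haY : a ∈ p.1
        · have hwp : p ∈ PySem.Dict.getD (buildWatch F) a [] :=
            buildWatch_complete F p hp a haY
          exact b4 p hwp (fun y hy => (hYsplit y hy).1) z hz
        · have hold : ∀ y ∈ p.1, y ∈ C ∧ y ∉ q' ++ [a] := by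
            intro y hy
            refine ⟨(hYsplit y hy).1, ?_⟩
            intro hc
            rcases List.mem_append.1 hc with h | h
            · exact (hYsplit y hy).2 h
            · exact haY (List.mem_singleton.1 h ▸ hy)
          exact List.mem_append_left _ (i3 p hp hold z hz)
      exact ih (C ++ new, q' ++ new) hfuel' j1 j2 j3

theorem loopW_charac (K : List String) (F : List (List String × List String)) :
    ∀ x, x ∈ loopW (buildWatch F) ((F.map (fun p => p.2.length)).sum + 1)
      (checkFDs F (PySem.Set.ofList K, [])) ↔ Deriv K F x := by
  obtain ⟨new, b1, b2, b3, b4, b5⟩ :=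
    checkFDs_spec K F F (fun p hp => hp) (PySem.Set.ofList K) []
  have hst : checkFDs F (PySem.Set.ofList K, ([] : List String))
      = (PySem.Set.ofList K ++ new, new) := by
    rw [b1]
    simp
  have hKsound : ∀ x ∈ PySem.Set.ofList K, Deriv K F x :=
    fun x hx => Deriv.base ((PySem.Set.mem_ofList _ _).1 hx)
  have hfuel : (checkFDs F (PySem.Set.ofList K, ([] : List String))).2.length
      + missing F (checkFDs F (PySem.Set.ofList K, ([] : List String))).1
      < (F.map (fun p => p.2.length)).sum + 1 := by
    rw [hst]
    show new.length + missing F (PySem.Set.ofList K ++ new) < _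
    have hmiss := missing_append F (PySem.Set.ofList K) new b2
      (fun x hx => (b3 x hx).1) (fun x hx => (b3 x hx).2)
    have := missing_le F (PySem.Set.ofList K)
    omega
  have hinv1 : ∀ x ∈ (checkFDs F (PySem.Set.ofList K, ([] : List String))).1, Deriv K F x := by
    rw [hst]
    intro x hx
    rcases List.mem_append.1 hx with h | h
    · exact hKsound x h
    · exact b5 hKsound x h
  have hinv0 : ∀ x ∈ K, x ∈ (checkFDs F (PySem.Set.ofList K, ([] : List String))).1 := by
    rw [hst]
    intro x hx
    exact List.mem_append_left _ ((PySem.Set.mem_ofList _ _).2 hx)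
  have hinv2 : ∀ p ∈ F, (∀ y ∈ p.1, y ∈ (checkFDs F (PySem.Set.ofList K, ([] : List String))).1
      ∧ y ∉ (checkFDs F (PySem.Set.ofList K, ([] : List String))).2) →
      ∀ z ∈ p.2, z ∈ (checkFDs F (PySem.Set.ofList K, ([] : List String))).1 := by
    rw [hst]
    intro p hp hY z hz
    have hYC : ∀ y ∈ p.1, y ∈ PySem.Set.ofList K := by
      intro y hy
      obtain ⟨hy1, hy2⟩ := hY y hy
      rcases List.mem_append.1 hy1 with h | h
      · exact h
      · exact absurd h hy2
    exact b4 p hp hYC z hz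
  obtain ⟨c1, c2, c3⟩ := loopW_main K F _ _ hfuel hinv0 hinv1 hinv2
  exact mem_iff_deriv K F _ c1 c2 c3

-- ===== VERDICT (by name: the statement is the Claim_ definition above) =====
theorem is_superkey_spec : Claim_equal_is_superkey := by
  intro K S F _
  show PySem.Set.equal (loopA F (K.length + (F.map (fun p => p.2.length)).sum + 1) K) S
      = PySem.Set.equal (loopW (buildWatch F) ((F.map (fun p => p.2.length)).sum + 1)
          (checkFDs F (PySem.Set.ofList K, []))) S
  exact equal_congr (fun x => (loopA_charac K F x).trans (loopW_charac K F x).symm)
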